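-- pv_equiv track=rewrite | github.com/Ayyappan-1/Python-DSA-Practice | Searching/Predecessor_&_Successor.py | predecessor_successor
-- ===== SOURCE A (Python) =====
-- def predecessor_successor(a,target):
--     predecessor=successor=-1
--     for i in a:
--         if(i<target):
--             if(predecessor==-1 or i>predecessor):
--                predecessor=i
--         if(i>target  ):
--             if(successor==-1 or i<successor):
--                successor=i
--     return predecessor,successor
-- ===== SOURCE B (Python) =====
-- def predecessor_successor(a, target):
--     s = sorted(a)
--     n = len(s)
--     # first index with s[i] >= target
--     lo, hi = 0, n
--     while lo < hi:
--         mid = (lo + hi) // 2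
--         if s[mid] < target:
--             lo = mid + 1
--         else:
--             hi = mid
--     i = lo
--     # first index with s[j] > target
--     lo, hi = 0, n
--     while lo < hi:
--         mid = (lo + hi) // 2
--         if s[mid] <= target:
--             lo = mid + 1
--         else:
--             hi = mid
--     j = lo
--     predecessor = s[i - 1] if i > 0 else -1
--     successor = s[j] if j < n else -1
--     return predecessor, successor
-- ===== Notes on version B (the rewrite author's own statement) =====
-- stated objective: alternative
-- what changed: Replaces A's single sentinel-guarded scan by sort-then-two-binary-searches: B sorts a copy of the list and binary-searches the two insertion points of target, returning the neighbouring elements; this also fixes A's broken -1 sentinel.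
-- intended difference: When -1 is itself the true predecessor (resp. successor) and a further element below (resp. above) -1 follows the last -1 of the list, A's '== -1' sentinel test mistakes the stored -1 for 'not found' and overwrites it (e.g. A([-1,-5],0) = (-5,-1)), while B returns the intended extremum (-1,-1). — e.g. on predecessor_successor([-1, -5], 0): A returns [-5, -1], B returns [-1, -1]
import Mathlib
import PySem

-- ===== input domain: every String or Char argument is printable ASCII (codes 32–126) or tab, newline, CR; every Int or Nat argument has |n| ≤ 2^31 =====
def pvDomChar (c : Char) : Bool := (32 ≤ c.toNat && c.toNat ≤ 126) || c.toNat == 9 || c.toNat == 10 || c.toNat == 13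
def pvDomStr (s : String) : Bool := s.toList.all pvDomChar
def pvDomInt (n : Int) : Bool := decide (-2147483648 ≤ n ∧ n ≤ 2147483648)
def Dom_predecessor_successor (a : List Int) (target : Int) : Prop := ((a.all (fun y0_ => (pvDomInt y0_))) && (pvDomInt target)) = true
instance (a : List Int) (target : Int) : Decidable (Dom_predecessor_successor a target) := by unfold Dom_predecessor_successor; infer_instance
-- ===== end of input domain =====

-- B replaces A's sentinel-guarded single scan by sort + two hand-written binary searches for
-- target's insertion points, returning the neighbouring elements (alternative algorithm);
-- this also fixes A's broken '== -1' sentinel test (see D_ below).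

-- ===== PORT A =====
-- inner body of 'if(i<target): if(predecessor==-1 or i>predecessor): predecessor=i'
def psStepP (target p i : Int) : Int := if i < target ∧ (p = -1 ∨ i > p) then i else p
-- inner body of 'if(i>target): if(successor==-1 or i<successor): successor=i'
def psStepS (target s i : Int) : Int := if i > target ∧ (s = -1 ∨ i < s) then i else s

def predecessor_successor (a : List Int) (target : Int) : List Int :=
  let ps := a.foldl (fun ps i => (psStepP target ps.1 i, psStepS target ps.2 i)) (-1, -1)
  [ps.1, ps.2]

-- ===== PORT B =====
-- 'while lo < hi: mid = (lo+hi)//2; if p(s[mid]): lo = mid+1 else: hi = mid' — each of Source B's two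
-- while loops is this loop with its own comparison p ('< target' resp. '<= target').
-- lo, hi stay in [0, len s], so '//' is Nat division and the index mid is always in range
-- (the List.getD default 0 is unreachable).
-- fuel = number of remaining loop iterations; hi - lo shrinks each pass, so any fuel ≥ hi - lo
-- (we pass len s) makes this the exact while loop.
def bsLoop (s : List Int) (p : Int → Bool) : Nat → Nat → Nat → Nat
  | 0, lo, _ => lo
  | fuel + 1, lo, hi =>
    if lo < hi then
      let mid := (lo + hi) / 2
      if p (s.getD mid 0) then bsLoop s p fuel (mid + 1) hi else bsLoop s p fuel lo mid
    else lo

def predecessor_successor_alt (a : List Int) (target : Int) : List Int :=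
  let s := PySem.List.sorted a (fun x => x) false
  let n := s.length
  let i := bsLoop s (fun x => decide (x < target)) n 0 n   -- first index with s[i] >= target
  let j := bsLoop s (fun x => decide (x ≤ target)) n 0 n   -- first index with s[j] > target
  -- 's[i-1] if i > 0 else -1' / 's[j] if j < n else -1'; both indices in range when taken
  [if i > 0 then s.getD (i - 1) (-1) else -1,
   if j < n then s.getD j (-1) else -1]

-- ===== PRECONDITION & SPEC =====
-- When -1 is itself the true predecessor (resp. successor) and a further element below (resp.
-- above) -1 follows the last -1 of the list, A's '== -1' sentinel test mistakes the stored -1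
-- for 'not found' and overwrites it (A([-1,-5],0) = (-5,-1)); B returns the intended extremum ((-1,-1)).
def D_predecessor_successor (a : List Int) (target : Int) : Prop :=
  ((-1 : Int) < target ∧ (-1 : Int) ∈ a ∧ (∀ x ∈ a, ¬((-1 : Int) < x ∧ x < target)) ∧
     ∃ x ∈ a.reverse.takeWhile (fun y => decide (y ≠ (-1 : Int))), x < -1) ∨
  (target < (-1 : Int) ∧ (-1 : Int) ∈ a ∧ (∀ x ∈ a, ¬(target < x ∧ x < (-1 : Int))) ∧
     ∃ x ∈ a.reverse.takeWhile (fun y => decide (y ≠ (-1 : Int))), (-1 : Int) < x)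
instance (a : List Int) (target : Int) : Decidable (D_predecessor_successor a target) := by
  unfold D_predecessor_successor; infer_instance

def Spec_predecessor_successor (a : List Int) (target : Int) (out : List Int) : Prop :=
  ¬ D_predecessor_successor a target → out = predecessor_successor_alt a target
instance (a : List Int) (target : Int) (out : List Int) : Decidable (Spec_predecessor_successor a target out) := by
  unfold Spec_predecessor_successor; infer_instance

def pvDiffWitness_predecessor_successor : List Int × Int := ([-1, -5], 0)
def pvDiffWitnessOut_predecessor_successor : (List Int) × (List Int) := ([-5, -1], [-1, -1])

-- ===== CLAIM (what is proved, stated in full; the proofs are below) =====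
def Claim_unchanged_predecessor_successor : Prop := ∀ (a : List Int) (target : Int), Dom_predecessor_successor a target → Spec_predecessor_successor a target (predecessor_successor a target)
def Claim_changed_predecessor_successor : Prop := Dom_predecessor_successor (pvDiffWitness_predecessor_successor.1) (pvDiffWitness_predecessor_successor.2) ∧ D_predecessor_successor (pvDiffWitness_predecessor_successor.1) (pvDiffWitness_predecessor_successor.2) ∧ predecessor_successor (pvDiffWitness_predecessor_successor.1) (pvDiffWitness_predecessor_successor.2) = pvDiffWitnessOut_predecessor_successor.1 ∧ predecessor_successor_alt (pvDiffWitness_predecessor_successor.1) (pvDiffWitness_predecessor_successor.2) = pvDiffWitnessOut_predecessor_successor.2 ∧ pvDiffWitnessOut_predecessor_successor.1 ≠ pvDiffWitnessOut_predecessor_successor.2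
def Claim_exact_predecessor_successor : Prop := ∀ (a : List Int) (target : Int), Dom_predecessor_successor a target → D_predecessor_successor a target → predecessor_successor a target ≠ predecessor_successor_alt a target

-- ===== LEMMAS AND PROOFS =====

-- A's two state updates, restricted to the elements that pass the outer comparison
def hP (p i : Int) : Int := if p = -1 ∨ i > p then i else p
def hS (s i : Int) : Int := if s = -1 ∨ i < s then i else s

-- the elements strictly after the last -1 of l (in reverse order)
def twL (l : List Int) : List Int := l.reverse.takeWhile (fun y => decide (y ≠ (-1 : Int)))

theorem hP_take {r x : Int} (h : r = -1 ∨ r < x) : hP r x = x := by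
  unfold hP; rcases h with h | h
  · rw [if_pos (Or.inl h)]
  · rw [if_pos (Or.inr h)]

theorem hP_keep {r x : Int} (h1 : r ≠ -1) (h2 : x ≤ r) : hP r x = r := by
  unfold hP; rw [if_neg (by omega)]

theorem hS_take {r x : Int} (h : r = -1 ∨ x < r) : hS r x = x := by
  unfold hS; rcases h with h | h
  · rw [if_pos (Or.inl h)]
  · rw [if_pos (Or.inr h)]

theorem hS_keep {r x : Int} (h1 : r ≠ -1) (h2 : r ≤ x) : hS r x = r := by
  unfold hS; rw [if_neg (by omega)]

theorem foldl_pair (t : Int) : ∀ (a : List Int) (p s : Int),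
    a.foldl (fun ps i => (psStepP t ps.1 i, psStepS t ps.2 i)) (p, s)
      = (a.foldl (psStepP t) p, a.foldl (psStepS t) s) := by
  intro a; induction a with
  | nil => intro p s; rfl
  | cons i l ih => intro p s; simp [List.foldl_cons, ih]

theorem foldl_stepP_filter (t : Int) : ∀ (a : List Int) (p : Int),
    a.foldl (psStepP t) p = (a.filter (fun x => decide (x < t))).foldl hP p := by
  intro a; induction a with
  | nil => intro p; rfl
  | cons i l ih =>
    intro p
    by_cases h : i < t <;> simp [List.foldl_cons, h, psStepP, hP, ih]

theorem foldl_stepS_filter (t : Int) : ∀ (a : List Int) (s : Int),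
    a.foldl (psStepS t) s = (a.filter (fun x => decide (x > t))).foldl hS s := by
  intro a; induction a with
  | nil => intro s; rfl
  | cons i l ih =>
    intro s
    by_cases h : i > t <;> simp [List.foldl_cons, h, psStepS, hS, ih]

theorem A_components (a : List Int) (t : Int) :
    predecessor_successor a t
      = [(a.filter (fun x => decide (x < t))).foldl hP (-1),
         (a.filter (fun x => decide (x > t))).foldl hS (-1)] := by
  unfold predecessor_successor
  rw [foldl_pair, foldl_stepP_filter, foldl_stepS_filter]

theorem mem_takeWhile_both {p : Int → Bool} : ∀ (l : List Int) (y : Int),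
    y ∈ l.takeWhile p → y ∈ l ∧ p y = true := by
  intro l; induction l with
  | nil => intro y h; simp [List.takeWhile] at h
  | cons x l ih =>
    intro y h
    by_cases hx : p x = true
    · simp [List.takeWhile_cons, hx] at h
      rcases h with h | h
      · subst h; exact ⟨List.mem_cons_self, hx⟩
      · rcases ih y h with ⟨h1, h2⟩; exact ⟨List.mem_cons_of_mem _ h1, h2⟩
    · simp [List.takeWhile_cons, hx] at h

theorem mem_twL {l : List Int} {y : Int} (h : y ∈ twL l) : y ∈ l ∧ y ≠ -1 := by
  rcases mem_takeWhile_both _ _ h with ⟨h1, h2⟩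
  refine ⟨List.mem_reverse.mp h1, ?_⟩
  simpa using h2

theorem mx_concat (l : List Int) (x : Int) :
    PySem.List.max? (l ++ [x]) (fun y => y) = some (max ((PySem.List.max? l (fun y => y)).getD x) x) := by
  cases l with
  | nil => simp [PySem.List.max?, PySem.List.max?_id_cons]
  | cons y t => simp [PySem.List.max?_id_cons, List.foldl_append]

theorem mn_concat (l : List Int) (x : Int) :
    PySem.List.min? (l ++ [x]) (fun y => y) = some (min ((PySem.List.min? l (fun y => y)).getD x) x) := by
  cases l with
  | nil => simp [PySem.List.min?, PySem.List.min?_id_cons]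
  | cons y t => simp [PySem.List.min?_id_cons, List.foldl_append]

theorem twL_concat (l : List Int) (x : Int) :
    twL (l ++ [x]) = if x = -1 then [] else x :: twL l := by
  by_cases hx : x = (-1 : Int) <;> simp [twL, List.takeWhile_cons, hx]

theorem foldl_max_shift : ∀ (l : List Int) (x z : Int),
    l.foldl max (max x z) = max x (l.foldl max z) := by
  intro l; induction l with
  | nil => intro x z; rfl
  | cons i l ih =>
    intro x z
    simp only [List.foldl_cons, max_assoc, ih]

theorem foldl_min_shift : ∀ (l : List Int) (x z : Int),
    l.foldl min (min x z) = min x (l.foldl min z) := by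
  intro l; induction l with
  | nil => intro x z; rfl
  | cons i l ih =>
    intro i x
    simp only [List.foldl_cons, min_assoc, ih]

theorem foldl_max_of_max? {l : List Int} {m : Int} (h : PySem.List.max? l (fun y => y) = some m)
    (x : Int) : l.foldl max x = max x m := by
  cases l with
  | nil => simp [PySem.List.max?] at h
  | cons z t =>
    rw [PySem.List.max?_id_cons] at h
    injection h with h
    simp only [List.foldl_cons, ← h, ← foldl_max_shift]

theorem foldl_min_of_min? {l : List Int} {m : Int} (h : PySem.List.min? l (fun y => y) = some m)
    (x : Int) : l.foldl min x = min x m := by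
  cases l with
  | nil => simp [PySem.List.min?] at h
  | cons z t =>
    rw [PySem.List.min?_id_cons] at h
    injection h with h
    simp only [List.foldl_cons, ← h, ← foldl_min_shift]

-- characterisation of A's predecessor loop over the already-filtered list
theorem charP : ∀ (F : List Int),
    F.foldl hP (-1)
      = if PySem.List.max? F (fun y => y) = some (-1)
        then (PySem.List.max? (twL F) (fun y => y)).getD (-1)
        else (PySem.List.max? F (fun y => y)).getD (-1) := by
  intro F
  induction F using List.reverseRecOn with
  | nil => simp [twL, PySem.List.max?]
  | append_singleton l x ih =>
    have hfold : (l ++ [x]).foldl hP (-1) = hP (l.foldl hP (-1)) x := by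
      simp [List.foldl_append]
    rw [hfold, ih, mx_concat, twL_concat]
    rcases hM : PySem.List.max? l (fun y => y) with _ | M
    · have hl : l = [] := (PySem.List.max?_eq_none_iff l (fun y => y)).mp hM
      subst hl
      by_cases hx : x = (-1 : Int)
      · subst hx; simp [hP, twL, PySem.List.max?]
      · simp [hP, hx, twL, PySem.List.max?, PySem.List.max?_id_cons]
    · have hMmax : ∀ y ∈ l, y ≤ M := fun y hy => PySem.List.max?_isMax hM y hy
      simp only [hM, Option.getD_some]
      by_cases hM1 : M = (-1 : Int)
      · subst hM1
        rw [if_pos rfl]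
        have hr : (PySem.List.max? (twL l) (fun y => y)).getD (-1) ≤ -1 := by
          rcases htw : PySem.List.max? (twL l) (fun y => y) with _ | m
          · simp
          · have hmem := mem_twL (PySem.List.max?_mem htw)
            have hle : m ≤ -1 := hMmax m hmem.1
            simpa using hle
        set r := (PySem.List.max? (twL l) (fun y => y)).getD (-1) with hrdef
        by_cases hx : x = (-1 : Int)
        · subst hx
          rw [hP_take (by omega), if_pos (show ((-1:Int)) = -1 from rfl),
            if_pos (by rw [Option.some.injEq]; omega)]
          simp [PySem.List.max?]
        · by_cases hxlt : x < (-1 : Int)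
          · rw [if_pos (by rw [Option.some.injEq]; omega), if_neg hx, PySem.List.max?_id_cons,
              Option.getD_some]
            rcases htw : PySem.List.max? (twL l) (fun y => y) with _ | m
            · have htwnil : twL l = [] := (PySem.List.max?_eq_none_iff (twL l) (fun y => y)).mp htw
              have hr1 : r = -1 := by rw [hrdef, htw]; rfl
              rw [htwnil, hr1, hP_take (Or.inl rfl)]
              rfl
            · have hmem := mem_twL (PySem.List.max?_mem htw)
              have hm : m < -1 := lt_of_le_of_ne (hMmax m hmem.1) hmem.2
              have hr1 : r = m := by rw [hrdef, htw]; rfl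
              rw [foldl_max_of_max? htw x, hr1]
              by_cases hc : m < x
              · rw [hP_take (Or.inr hc)]; omega
              · rw [hP_keep (by omega) (by omega)]; omega
          · rw [hP_take (by omega), if_neg (by intro h; rw [Option.some.injEq] at h; omega)]
            omega
      · rw [if_neg (by intro h; rw [Option.some.injEq] at h; exact hM1 h)]
        by_cases hMn : (-1 : Int) < M
        · rw [if_neg (by intro h; rw [Option.some.injEq] at h; omega)]
          by_cases hc : M < x
          · rw [hP_take (Or.inr hc)]; omega
          · rw [hP_keep hM1 (by omega)]; omega
        · have hMlt : M < -1 := by omega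
          by_cases hx : x = (-1 : Int)
          · subst hx
            rw [hP_take (by omega), if_pos (show ((-1:Int)) = -1 from rfl),
              if_pos (by rw [Option.some.injEq]; omega)]
            simp [PySem.List.max?]
          · rw [if_neg (by intro h; rw [Option.some.injEq] at h; omega)]
            by_cases hc : M < x
            · rw [hP_take (Or.inr hc)]; omega
            · rw [hP_keep hM1 (by omega)]; omega

-- characterisation of A's successor loop over the already-filtered list (mirror image)
theorem charS : ∀ (F : List Int),
    F.foldl hS (-1)
      = if PySem.List.min? F (fun y => y) = some (-1)
        then (PySem.List.min? (twL F) (fun y => y)).getD (-1)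
        else (PySem.List.min? F (fun y => y)).getD (-1) := by
  intro F
  induction F using List.reverseRecOn with
  | nil => simp [twL, PySem.List.min?]
  | append_singleton l x ih =>
    have hfold : (l ++ [x]).foldl hS (-1) = hS (l.foldl hS (-1)) x := by
      simp [List.foldl_append]
    rw [hfold, ih, mn_concat, twL_concat]
    rcases hM : PySem.List.min? l (fun y => y) with _ | M
    · have hl : l = [] := (PySem.List.min?_eq_none_iff l (fun y => y)).mp hM
      subst hl
      by_cases hx : x = (-1 : Int)
      · subst hx; simp [hS, twL, PySem.List.min?]
      · simp [hS, hx, twL, PySem.List.min?, PySem.List.min?_id_cons]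
    · have hMmin : ∀ y ∈ l, M ≤ y := fun y hy => PySem.List.min?_isMin hM y hy
      simp only [hM, Option.getD_some]
      by_cases hM1 : M = (-1 : Int)
      · subst hM1
        rw [if_pos rfl]
        have hr : -1 ≤ (PySem.List.min? (twL l) (fun y => y)).getD (-1) := by
          rcases htw : PySem.List.min? (twL l) (fun y => y) with _ | m
          · simp
          · have hmem := mem_twL (PySem.List.min?_mem htw)
            have hle : -1 ≤ m := hMmin m hmem.1
            simpa using hle
        set r := (PySem.List.min? (twL l) (fun y => y)).getD (-1) with hrdef
        by_cases hx : x = (-1 : Int)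
        · subst hx
          rw [hS_take (by omega), if_pos (show ((-1:Int)) = -1 from rfl),
            if_pos (by rw [Option.some.injEq]; omega)]
          simp [PySem.List.min?]
        · by_cases hxgt : (-1 : Int) < x
          · rw [if_pos (by rw [Option.some.injEq]; omega), if_neg hx, PySem.List.min?_id_cons,
              Option.getD_some]
            rcases htw : PySem.List.min? (twL l) (fun y => y) with _ | m
            · have htwnil : twL l = [] := (PySem.List.min?_eq_none_iff (twL l) (fun y => y)).mp htw
              have hr1 : r = -1 := by rw [hrdef, htw]; rfl
              rw [htwnil, hr1, hS_take (Or.inl rfl)]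
              rfl
            · have hmem := mem_twL (PySem.List.min?_mem htw)
              have hm : -1 < m := lt_of_le_of_ne (hMmin m hmem.1) (Ne.symm hmem.2)
              have hr1 : r = m := by rw [hrdef, htw]; rfl
              rw [foldl_min_of_min? htw x, hr1]
              by_cases hc : x < m
              · rw [hS_take (Or.inr hc)]; omega
              · rw [hS_keep (by omega) (by omega)]; omega
          · rw [hS_take (by omega), if_neg (by intro h; rw [Option.some.injEq] at h; omega)]
            omega
      · rw [if_neg (by intro h; rw [Option.some.injEq] at h; exact hM1 h)]
        by_cases hMn : M < (-1 : Int)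
        · rw [if_neg (by intro h; rw [Option.some.injEq] at h; omega)]
          by_cases hc : x < M
          · rw [hS_take (Or.inr hc)]; omega
          · rw [hS_keep hM1 (by omega)]; omega
        · have hMgt : -1 < M := by omega
          by_cases hx : x = (-1 : Int)
          · subst hx
            rw [hS_take (by omega), if_pos (show ((-1:Int)) = -1 from rfl),
              if_pos (by rw [Option.some.injEq]; omega)]
            simp [PySem.List.min?]
          · rw [if_neg (by intro h; rw [Option.some.injEq] at h; omega)]
            by_cases hc : x < M
            · rw [hS_take (Or.inr hc)]; omega
            · rw [hS_keep hM1 (by omega)]; omega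

-- takeWhile (≠ -1) commutes with the (< t) / (> t) filters when -1 lies on the kept side
theorem takeWhile_filter_lt (t : Int) (h : (-1 : Int) < t) : ∀ (M : List Int),
    (M.filter (fun x => decide (x < t))).takeWhile (fun y => decide (y ≠ (-1 : Int)))
      = (M.takeWhile (fun y => decide (y ≠ (-1 : Int)))).filter (fun x => decide (x < t)) := by
  intro M; induction M with
  | nil => rfl
  | cons x l ih =>
    simp only [ne_eq, decide_not] at ih ⊢
    by_cases hlt : x < t
    · by_cases hx : x = (-1 : Int)
      · subst hx; simp [List.filter_cons, List.takeWhile_cons, h]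
      · simp [List.filter_cons, List.takeWhile_cons, hlt, hx, ih]
    · have hx : x ≠ (-1 : Int) := by omega
      simp [List.filter_cons, List.takeWhile_cons, hlt, hx, ih]

theorem takeWhile_filter_gt (t : Int) (h : t < (-1 : Int)) : ∀ (M : List Int),
    (M.filter (fun x => decide (x > t))).takeWhile (fun y => decide (y ≠ (-1 : Int)))
      = (M.takeWhile (fun y => decide (y ≠ (-1 : Int)))).filter (fun x => decide (x > t)) := by
  intro M; induction M with
  | nil => rfl
  | cons x l ih =>
    simp only [ne_eq, decide_not] at ih ⊢
    by_cases hgt : x > t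
    · by_cases hx : x = (-1 : Int)
      · subst hx; simp [List.filter_cons, List.takeWhile_cons, h]
      · simp [List.filter_cons, List.takeWhile_cons, hgt, hx, ih]
    · have hx : x ≠ (-1 : Int) := by omega
      simp [List.filter_cons, List.takeWhile_cons, hgt, hx, ih]

theorem twL_filter_lt (a : List Int) (t : Int) (h : (-1 : Int) < t) :
    twL (a.filter (fun x => decide (x < t))) = (twL a).filter (fun x => decide (x < t)) := by
  unfold twL
  rw [← List.filter_reverse, takeWhile_filter_lt t h]

theorem twL_filter_gt (a : List Int) (t : Int) (h : t < (-1 : Int)) :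
    twL (a.filter (fun x => decide (x > t))) = (twL a).filter (fun x => decide (x > t)) := by
  unfold twL
  rw [← List.filter_reverse, takeWhile_filter_gt t h]

-- pred component: outside D_'s first disjunct A's loop value is the max of the filtered list
theorem predP_eq (a : List Int) (t : Int)
    (hD : ¬((-1 : Int) < t ∧ (-1 : Int) ∈ a ∧ (∀ x ∈ a, ¬((-1 : Int) < x ∧ x < t)) ∧
       ∃ x ∈ a.reverse.takeWhile (fun y => decide (y ≠ (-1 : Int))), x < -1)) :
    (a.filter (fun x => decide (x < t))).foldl hP (-1)
      = (PySem.List.max? (a.filter (fun x => decide (x < t))) (fun x => x)).getD (-1) := by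
  rw [charP]
  by_cases hM : PySem.List.max? (a.filter (fun x => decide (x < t))) (fun y => y) = some (-1)
  · have hmem := PySem.List.max?_mem hM
    rcases List.mem_filter.mp hmem with ⟨hmema, hlt⟩
    have ht : (-1 : Int) < t := by simpa using hlt
    have hmid : ∀ x ∈ a, ¬((-1 : Int) < x ∧ x < t) := by
      intro x hx hc
      have hxF : x ∈ a.filter (fun x => decide (x < t)) :=
        List.mem_filter.mpr ⟨hx, by simpa using hc.2⟩
      have := PySem.List.max?_isMax hM x hxF
      simp at this; omega
    have htw : twL (a.filter (fun x => decide (x < t))) = [] := by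
      rcases hcase : twL (a.filter (fun x => decide (x < t))) with _ | ⟨z, tz⟩
      · rfl
      · exfalso
        have hz : z ∈ twL (a.filter (fun x => decide (x < t))) := by
          rw [hcase]; exact List.mem_cons_self
        rcases mem_twL hz with ⟨hzF, hzne⟩
        have hzle : z ≤ -1 := by
          have := PySem.List.max?_isMax hM z hzF; simpa using this
        have hzlt : z < -1 := lt_of_le_of_ne hzle hzne
        rw [twL_filter_lt a t ht] at hz
        rcases List.mem_filter.mp hz with ⟨hztw, _⟩
        exact hD ⟨ht, hmema, hmid, z, hztw, hzlt⟩
    rw [if_pos hM, htw, hM]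
    simp [PySem.List.max?]
  · rw [if_neg hM]

-- succ component: outside D_'s second disjunct A's loop value is the min of the filtered list
theorem succS_eq (a : List Int) (t : Int)
    (hD : ¬(t < (-1 : Int) ∧ (-1 : Int) ∈ a ∧ (∀ x ∈ a, ¬(t < x ∧ x < (-1 : Int))) ∧
       ∃ x ∈ a.reverse.takeWhile (fun y => decide (y ≠ (-1 : Int))), (-1 : Int) < x)) :
    (a.filter (fun x => decide (x > t))).foldl hS (-1)
      = (PySem.List.min? (a.filter (fun x => decide (x > t))) (fun x => x)).getD (-1) := by
  rw [charS]
  by_cases hM : PySem.List.min? (a.filter (fun x => decide (x > t))) (fun y => y) = some (-1)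
  · have hmem := PySem.List.min?_mem hM
    rcases List.mem_filter.mp hmem with ⟨hmema, hgt⟩
    have ht : t < (-1 : Int) := by simpa using hgt
    have hmid : ∀ x ∈ a, ¬(t < x ∧ x < (-1 : Int)) := by
      intro x hx hc
      have hxF : x ∈ a.filter (fun x => decide (x > t)) :=
        List.mem_filter.mpr ⟨hx, by simpa using hc.1⟩
      have := PySem.List.min?_isMin hM x hxF
      simp at this; omega
    have htw : twL (a.filter (fun x => decide (x > t))) = [] := by
      rcases hcase : twL (a.filter (fun x => decide (x > t))) with _ | ⟨z, tz⟩
      · rfl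
      · exfalso
        have hz : z ∈ twL (a.filter (fun x => decide (x > t))) := by
          rw [hcase]; exact List.mem_cons_self
        rcases mem_twL hz with ⟨hzF, hzne⟩
        have hzge : -1 ≤ z := by
          have := PySem.List.min?_isMin hM z hzF; simpa using this
        have hzgt : -1 < z := lt_of_le_of_ne hzge (Ne.symm hzne)
        rw [twL_filter_gt a t ht] at hz
        rcases List.mem_filter.mp hz with ⟨hztw, _⟩
        exact hD ⟨ht, hmema, hmid, z, hztw, hzgt⟩
    rw [if_pos hM, htw, hM]
    simp [PySem.List.min?]
  · rw [if_neg hM]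

-- inside D_'s first disjunct: A's pred value is < -1 while the true max of the filter is -1
theorem predP_ne (a : List Int) (t : Int)
    (ht : (-1 : Int) < t) (hmem : (-1 : Int) ∈ a)
    (hmid : ∀ x ∈ a, ¬((-1 : Int) < x ∧ x < t))
    (hw : ∃ x ∈ a.reverse.takeWhile (fun y => decide (y ≠ (-1 : Int))), x < -1) :
    (a.filter (fun x => decide (x < t))).foldl hP (-1)
      ≠ (PySem.List.max? (a.filter (fun x => decide (x < t))) (fun x => x)).getD (-1) := by
  rcases hw with ⟨y, hytw, hy⟩
  have hF1 : (-1 : Int) ∈ a.filter (fun x => decide (x < t)) :=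
    List.mem_filter.mpr ⟨hmem, by simpa using ht⟩
  have hMx : PySem.List.max? (a.filter (fun x => decide (x < t))) (fun y => y) = some (-1) := by
    rcases hM : PySem.List.max? (a.filter (fun x => decide (x < t))) (fun y => y) with _ | M
    · have := (PySem.List.max?_eq_none_iff _ (fun y => y)).mp hM
      rw [this] at hF1; simp at hF1
    · have hMmem := PySem.List.max?_mem hM
      rcases List.mem_filter.mp hMmem with ⟨hMa, hMlt⟩
      have h1 : M ≤ -1 := by
        have := hmid M hMa; simp at hMlt; omega
      have h2 : -1 ≤ M := by
        have := PySem.List.max?_isMax hM _ hF1; simpa using this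
      have : M = -1 := le_antisymm h1 h2
      rw [this]
  have hyF : y ∈ twL (a.filter (fun x => decide (x < t))) := by
    rw [twL_filter_lt a t ht]
    exact List.mem_filter.mpr ⟨hytw, by simp; omega⟩
  rcases htw : PySem.List.max? (twL (a.filter (fun x => decide (x < t)))) (fun y => y) with _ | m
  · have := (PySem.List.max?_eq_none_iff _ (fun y => y)).mp htw
    rw [this] at hyF; simp at hyF
  · have hmm := mem_twL (PySem.List.max?_mem htw)
    have hmle : m ≤ -1 := by
      have := PySem.List.max?_isMax hMx _ hmm.1; simpa using this
    have hmlt : m < -1 := lt_of_le_of_ne hmle hmm.2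
    rw [charP, if_pos hMx, htw, hMx]
    simp; omega

-- inside D_'s second disjunct: A's succ value is > -1 while the true min of the filter is -1
theorem succS_ne (a : List Int) (t : Int)
    (ht : t < (-1 : Int)) (hmem : (-1 : Int) ∈ a)
    (hmid : ∀ x ∈ a, ¬(t < x ∧ x < (-1 : Int)))
    (hw : ∃ x ∈ a.reverse.takeWhile (fun y => decide (y ≠ (-1 : Int))), (-1 : Int) < x) :
    (a.filter (fun x => decide (x > t))).foldl hS (-1)
      ≠ (PySem.List.min? (a.filter (fun x => decide (x > t))) (fun x => x)).getD (-1) := by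
  rcases hw with ⟨y, hytw, hy⟩
  have hF1 : (-1 : Int) ∈ a.filter (fun x => decide (x > t)) :=
    List.mem_filter.mpr ⟨hmem, by simpa using ht⟩
  have hMx : PySem.List.min? (a.filter (fun x => decide (x > t))) (fun y => y) = some (-1) := by
    rcases hM : PySem.List.min? (a.filter (fun x => decide (x > t))) (fun y => y) with _ | M
    · have := (PySem.List.min?_eq_none_iff _ (fun y => y)).mp hM
      rw [this] at hF1; simp at hF1
    · have hMmem := PySem.List.min?_mem hM
      rcases List.mem_filter.mp hMmem with ⟨hMa, hMgt⟩
      have h1 : -1 ≤ M := by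
        have := hmid M hMa; simp at hMgt; omega
      have h2 : M ≤ -1 := by
        have := PySem.List.min?_isMin hM _ hF1; simpa using this
      have : M = -1 := le_antisymm h2 h1
      rw [this]
  have hyF : y ∈ twL (a.filter (fun x => decide (x > t))) := by
    rw [twL_filter_gt a t ht]
    exact List.mem_filter.mpr ⟨hytw, by simp; omega⟩
  rcases htw : PySem.List.min? (twL (a.filter (fun x => decide (x > t)))) (fun y => y) with _ | m
  · have := (PySem.List.min?_eq_none_iff _ (fun y => y)).mp htw
    rw [this] at hyF; simp at hyF
  · have hmm := mem_twL (PySem.List.min?_mem htw)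
    have hmge : -1 ≤ m := by
      have := PySem.List.min?_isMin hMx _ hmm.1; simpa using this
    have hmgt : -1 < m := lt_of_le_of_ne hmge (Ne.symm hmm.2)
    rw [charS, if_pos hMx, htw, hMx]
    simp; omega

-- ===== B-side lemmas: sort + binary search computes the same extrema =====

-- on a ≤-sorted list a downward-closed predicate holds exactly on the takeWhile prefix
theorem takeWhile_eq_filter_sorted (p : Int → Bool)
    (hdc : ∀ x y : Int, x ≤ y → p y = true → p x = true) :
    ∀ (s : List Int), s.Pairwise (· ≤ ·) → s.takeWhile p = s.filter p := by
  intro s; induction s with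
  | nil => intro _; rfl
  | cons x l ih =>
    intro hs
    rcases List.pairwise_cons.mp hs with ⟨hx, hl⟩
    by_cases hpx : p x = true
    · simp [List.takeWhile_cons, List.filter_cons, hpx, ih hl]
    · have hfl : l.filter p = [] := by
        rw [List.filter_eq_nil_iff]
        intro y hy hpy
        exact hpx (hdc x y (hx y hy) hpy)
      simp [List.takeWhile_cons, List.filter_cons, hpx, hfl]

-- index characterisation of the takeWhile-prefix length on a sorted list
theorem prefix_indices (p : Int → Bool) (s : List Int) (hs : s.Pairwise (· ≤ ·))
    (hdc : ∀ x y : Int, x ≤ y → p y = true → p x = true) :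
    (s.takeWhile p).length ≤ s.length ∧
      (∀ k (hk : k < s.length), k < (s.takeWhile p).length → p s[k] = true) ∧
      (∀ k (hk : k < s.length), (s.takeWhile p).length ≤ k → p s[k] = false) := by
  have hpre : s.takeWhile p <+: s := List.takeWhile_prefix p
  have hlen : (s.takeWhile p).length ≤ s.length := hpre.length_le
  refine ⟨hlen, ?_, ?_⟩
  · intro k hk hkc
    have hget : (s.takeWhile p)[k] = s[k] := hpre.getElem hkc
    exact hget ▸ List.mem_takeWhile_imp (List.getElem_mem hkc)
  · intro k hk hck
    have hsplit : s.takeWhile p ++ s.dropWhile p = s := List.takeWhile_append_dropWhile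
    have hfil : s.filter p = s.takeWhile p := (takeWhile_eq_filter_sorted p hdc s hs).symm
    have hlensum : (s.takeWhile p).length + (s.dropWhile p).length = s.length := by
      have h1 := congrArg List.length hsplit
      rw [List.length_append] at h1
      exact h1
    have hdw : (s.dropWhile p).filter p = [] := by
      have h2 := congrArg (List.filter p) hsplit
      rw [List.filter_append, hfil,
        List.filter_eq_self.mpr (fun x hx => List.mem_takeWhile_imp hx)] at h2
      have h3 := congrArg List.length h2
      rw [List.length_append] at h3
      exact List.eq_nil_iff_length_eq_zero.mpr (by omega)
    have hdropEq : s.drop (s.takeWhile p).length = s.dropWhile p := by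
      have h4 := @List.drop_left _ (s.takeWhile p) (s.dropWhile p)
      rw [hsplit] at h4
      exact h4
    have hk2 : k - (s.takeWhile p).length < (s.drop (s.takeWhile p).length).length := by
      simp; omega
    have hget : (s.drop (s.takeWhile p).length)[k - (s.takeWhile p).length] = s[k] := by
      rw [List.getElem_drop]
      congr 1; omega
    have hmemdw : s[k] ∈ s.dropWhile p := by
      rw [← hdropEq, ← hget]
      exact List.getElem_mem hk2
    have hnp := List.filter_eq_nil_iff.mp hdw s[k] hmemdw
    simpa using hnp

-- the binary-search loop lands on the unique prefix/suffix boundary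
theorem bsLoop_eq (s : List Int) (p : Int → Bool) (c : Nat)
    (hc1 : ∀ k (hk : k < s.length), k < c → p s[k] = true)
    (hc2 : ∀ k (hk : k < s.length), c ≤ k → p s[k] = false) :
    ∀ (n lo hi : Nat), hi - lo ≤ n → lo ≤ c → c ≤ hi → hi ≤ s.length → bsLoop s p n lo hi = c := by
  intro n
  induction n with
  | zero =>
    intro lo hi hn hlo hhi hlen
    simp only [bsLoop]
    omega
  | succ n ih =>
    intro lo hi hn hlo hhi hlen
    by_cases h : lo < hi
    · have hmidlt : (lo + hi) / 2 < s.length := by omega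
      have hget : s.getD ((lo + hi) / 2) 0 = s[(lo + hi) / 2] := List.getD_eq_getElem s 0 hmidlt
      rcases hb : p (s.getD ((lo + hi) / 2) 0) with _ | _
      · have hcmid : c ≤ (lo + hi) / 2 := by
          by_contra hc
          have := hc1 ((lo + hi) / 2) hmidlt (by omega)
          rw [← hget, hb] at this; exact Bool.false_ne_true this
        simp only [bsLoop, if_pos h, hb, Bool.false_eq_true, if_false]
        exact ih lo ((lo + hi) / 2) (by omega) hlo hcmid (by omega)
      · have hcmid : (lo + hi) / 2 < c := by
          by_contra hc
          have := hc2 ((lo + hi) / 2) hmidlt (by omega)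
          rw [← hget, hb] at this; exact Bool.noConfusion this
        simp only [bsLoop, if_pos h, hb, if_true]
        exact ih ((lo + hi) / 2 + 1) hi (by omega) (by omega) hhi hlen
    · simp only [bsLoop, if_neg h]
      omega

-- B's two components are the max of the elements below target / min of those above
theorem alt_components (a : List Int) (t : Int) :
    predecessor_successor_alt a t
      = [(PySem.List.max? (a.filter (fun x => decide (x < t))) (fun x => x)).getD (-1),
         (PySem.List.min? (a.filter (fun x => decide (x > t))) (fun x => x)).getD (-1)] := by
  simp only [predecessor_successor_alt]
  set s := PySem.List.sorted a (fun x => x) false with hsdef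
  have hs : s.Pairwise (· ≤ ·) := PySem.List.sorted_pairwise a (fun x => x)
  have hperm : s.Perm a := PySem.List.sorted_perm a (fun x => x) false
  -- predecessor component
  have hdc1 : ∀ x y : Int, x ≤ y → decide (x < t) = true → True := fun _ _ _ _ => trivial
  rcases prefix_indices (fun x => decide (x < t)) s hs
      (by intro x y hxy hy; simp at hy ⊢; omega) with ⟨hle1, hin1, hout1⟩
  rcases prefix_indices (fun x => decide (x ≤ t)) s hs
      (by intro x y hxy hy; simp at hy ⊢; omega) with ⟨hle2, hin2, hout2⟩
  set c1 := (s.takeWhile (fun x => decide (x < t))).length with hc1def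
  set c2 := (s.takeWhile (fun x => decide (x ≤ t))).length with hc2def
  have hi1 : bsLoop s (fun x => decide (x < t)) s.length 0 s.length = c1 :=
    bsLoop_eq s _ c1 hin1 hout1 s.length 0 s.length (by omega) (by omega) hle1 le_rfl
  have hi2 : bsLoop s (fun x => decide (x ≤ t)) s.length 0 s.length = c2 :=
    bsLoop_eq s _ c2 hin2 hout2 s.length 0 s.length (by omega) (by omega) hle2 le_rfl
  rw [hi1, hi2]
  have hfilperm1 : (s.filter (fun x => decide (x < t))).Perm (a.filter (fun x => decide (x < t))) :=
    hperm.filter _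
  have hfilperm2 : (s.filter (fun x => decide (x > t))).Perm (a.filter (fun x => decide (x > t))) :=
    hperm.filter _
  have htwfil1 : s.takeWhile (fun x => decide (x < t)) = s.filter (fun x => decide (x < t)) :=
    takeWhile_eq_filter_sorted _ (by intro x y hxy hy; simp at hy ⊢; omega) s hs
  congr 1
  -- predecessor
  · by_cases hc0 : c1 = 0
    · rw [if_neg (by omega)]
      have hnil : s.filter (fun x => decide (x < t)) = [] := by
        rw [← htwfil1]; exact List.eq_nil_of_length_eq_zero (hc1def ▸ hc0)
      have hanil : a.filter (fun x => decide (x < t)) = [] := by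
        have hl := hfilperm1.length_eq
        rw [hnil] at hl
        exact List.eq_nil_iff_length_eq_zero.mpr hl.symm
      rw [hanil]
      simp [PySem.List.max?]
    · rw [if_pos (by omega)]
      have hc1lt : c1 - 1 < s.length := by omega
      have hget : s.getD (c1 - 1) (-1) = s[c1 - 1] := List.getD_eq_getElem s (-1) hc1lt
      rw [hget]
      -- s[c1-1] is in the filter and is an upper bound of it
      have hmemF : s[c1 - 1] ∈ a.filter (fun x => decide (x < t)) := by
        refine hfilperm1.mem_iff.mp ?_
        exact List.mem_filter.mpr ⟨List.getElem_mem hc1lt, hin1 (c1 - 1) hc1lt (by omega)⟩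
      have hub : ∀ y ∈ a.filter (fun x => decide (x < t)), y ≤ s[c1 - 1] := by
        intro y hy
        have hyS : y ∈ s.filter (fun x => decide (x < t)) := hfilperm1.mem_iff.mpr hy
        rcases List.mem_filter.mp hyS with ⟨hyS', hyP⟩
        rcases List.mem_iff_getElem.mp hyS' with ⟨k, hk, hky⟩
        have hkc : k < c1 := by
          by_contra hkc
          have := hout1 k hk (by omega)
          rw [hky] at this
          rw [this] at hyP; exact Bool.false_ne_true hyP
        calc y = s[k] := hky.symm
          _ ≤ s[c1 - 1] := PySem.List.sorted_id_getElem_mono a (by omega) hc1lt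
      rcases hM : PySem.List.max? (a.filter (fun x => decide (x < t))) (fun x => x) with _ | M
      · exact absurd ((PySem.List.max?_eq_none_iff _ _).mp hM ▸ hmemF) (List.not_mem_nil)
      · have hMm := PySem.List.max?_mem hM
        have h1 : M ≤ s[c1 - 1] := hub M hMm
        have h2 : s[c1 - 1] ≤ M := by
          have := PySem.List.max?_isMax hM _ hmemF; simpa using this
        simp [le_antisymm h1 h2]
  -- successor
  · have hgtdw : s.filter (fun x => decide (x > t)) = s.drop c2 := by
      have hsplit : s.takeWhile (fun x => decide (x ≤ t)) ++ s.dropWhile (fun x => decide (x ≤ t)) = s :=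
        List.takeWhile_append_dropWhile
      have hdrop : s.drop c2 = s.dropWhile (fun x => decide (x ≤ t)) := by
        conv_lhs => rw [← hsplit]
        rw [List.drop_append_of_le_length (by omega), hc2def]
        simp
      have htwfil2 : s.takeWhile (fun x => decide (x ≤ t)) = s.filter (fun x => decide (x ≤ t)) :=
        takeWhile_eq_filter_sorted _ (by intro x y hxy hy; simp at hy ⊢; omega) s hs
      -- every element of the dropWhile part is > t, every element of the takeWhile part is ≤ t
      have hdwall : ∀ x ∈ s.dropWhile (fun x => decide (x ≤ t)), x > t := by
        intro x hx
        have hidx : ∃ k, ∃ hk : k < s.length, c2 ≤ k ∧ s[k] = x := by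
          rw [← hdrop] at hx
          rcases List.mem_iff_getElem.mp hx with ⟨k, hk, hkx⟩
          refine ⟨k + c2, by
            have := List.length_drop (l := s) (i := c2); omega, by omega, ?_⟩
          rw [← hkx, List.getElem_drop]
          congr 1; omega
        rcases hidx with ⟨k, hk, hck, hkx⟩
        have := hout2 k hk hck
        rw [hkx] at this; simpa using this
      rw [hdrop]
      conv_lhs => rw [← hsplit]
      rw [List.filter_append,
        show (s.takeWhile (fun x => decide (x ≤ t))).filter (fun x => decide (x > t)) = [] from
          List.filter_eq_nil_iff.mpr (by
            intro x hx
            have := List.mem_takeWhile_imp hx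
            simp at this ⊢; omega),
        show (s.dropWhile (fun x => decide (x ≤ t))).filter (fun x => decide (x > t))
            = s.dropWhile (fun x => decide (x ≤ t)) from
          List.filter_eq_self.mpr (by intro x hx; simpa using hdwall x hx),
        List.nil_append]
    by_cases hcn : c2 < s.length
    · rw [if_pos hcn]
      have hget : s.getD c2 (-1) = s[c2] := List.getD_eq_getElem s (-1) hcn
      rw [hget]
      have hmemF : s[c2] ∈ a.filter (fun x => decide (x > t)) := by
        refine hfilperm2.mem_iff.mp ?_
        refine List.mem_filter.mpr ⟨List.getElem_mem hcn, ?_⟩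
        have := hout2 c2 hcn le_rfl
        simp at this ⊢; omega
      have hlb : ∀ y ∈ a.filter (fun x => decide (x > t)), s[c2] ≤ y := by
        intro y hy
        have hyS : y ∈ s.filter (fun x => decide (x > t)) := hfilperm2.mem_iff.mpr hy
        rw [hgtdw] at hyS
        rcases List.mem_iff_getElem.mp hyS with ⟨k, hk, hky⟩
        have hk' : k + c2 < s.length := by
          have := List.length_drop (l := s) (i := c2); omega
        have : y = s[k + c2] := by
          rw [← hky, List.getElem_drop]; congr 1; omega
        rw [this]
        exact PySem.List.sorted_id_getElem_mono a (by omega) hk'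
      rcases hM : PySem.List.min? (a.filter (fun x => decide (x > t))) (fun x => x) with _ | M
      · exact absurd ((PySem.List.min?_eq_none_iff _ _).mp hM ▸ hmemF) (List.not_mem_nil)
      · have hMm := PySem.List.min?_mem hM
        have h1 : s[c2] ≤ M := hlb M hMm
        have h2 : M ≤ s[c2] := by
          have := PySem.List.min?_isMin hM _ hmemF; simpa using this
        simp [le_antisymm h2 h1]
    · rw [if_neg (by omega)]
      have hnil : s.filter (fun x => decide (x > t)) = [] := by
        rw [hgtdw, List.drop_eq_nil_iff.mpr (by omega)]
      have hanil : a.filter (fun x => decide (x > t)) = [] := by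
        have hl := hfilperm2.length_eq
        rw [hnil] at hl
        exact List.eq_nil_iff_length_eq_zero.mpr hl.symm
      rw [hanil]
      simp [PySem.List.min?]

-- ===== VERDICT (by name: the statement is the Claim_ definition above) =====
theorem predecessor_successor_spec : Claim_unchanged_predecessor_successor := by
  intro a t _ hD
  unfold D_predecessor_successor at hD
  rw [A_components, alt_components]
  have h1 := predP_eq a t (by intro h; exact absurd (Or.inl h) hD)
  have h2 := succS_eq a t (by intro h; exact absurd (Or.inr h) hD)
  rw [h1, h2]

theorem predecessor_successor_changed : Claim_changed_predecessor_successor := by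
  unfold Claim_changed_predecessor_successor; decide

theorem predecessor_successor_tight : Claim_exact_predecessor_successor := by
  intro a t _ hD heq
  rw [A_components, alt_components] at heq
  simp only [List.cons.injEq, and_true] at heq
  rcases hD with ⟨ht, hmem, hmid, hw⟩ | ⟨ht, hmem, hmid, hw⟩
  · exact predP_ne a t ht hmem hmid hw heq.1
  · exact succS_ne a t ht hmem hmid hw heq.2
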